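-- pv_equiv track=rewrite | github.com/bartlomiejduda/ReverseBox | reversebox/image/psp_swizzle.py | psp_swizzle
-- ===== SOURCE A (Python) =====
-- def psp_swizzle(data, width: int, height: int):
--     result = [0] * (width * height)
--     row_blocks = width // 16
--     source_index = 0
--     data = list(data)
--     for y in range(height):
--         for x in range(width):
--             block_x = x // 16
--             block_y = y // 8
--
--             block_index = block_x + (block_y * row_blocks)
--             block_address = block_index * 16 * 8
--             result[
--                 block_address + (x - (block_x * 16)) + ((y - (block_y * 8)) * 16)
--             ] = data[source_index]
--             source_index += 1
--     return result
-- ===== SOURCE B (Python) =====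
-- def psp_swizzle(data, width: int, height: int):
--     # Tile-major scatter: walk destination 16x8 blocks and fill each block
--     # from its source rectangle, instead of A's row-major pixel scan with a
--     # running source counter.
--     result = [0] * (width * height)
--     row_blocks = width // 16
--     data = list(data)
--     for block_y in range((height + 7) // 8):
--         for block_x in range((width + 15) // 16):
--             block_address = (block_x + block_y * row_blocks) * 128
--             for ty in range(8):
--                 y = block_y * 8 + ty
--                 if y >= height:
--                     continue
--                 for tx in range(16):
--                     x = block_x * 16 + tx
--                     if x >= width:
--                         continue
--                     result[block_address + tx + ty * 16] = data[y * width + x]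
--     return result
-- ===== Notes on version B (the rewrite author's own statement) =====
-- stated objective: alternative
-- what changed: B fills the output tile-by-tile: it iterates over destination 16x8 blocks, computes each block's base address once, and gathers each block cell from its source pixel data[y*width+x], instead of A's row-major pixel scan that scatters via a running source counter and per-pixel block arithmetic.
import Mathlib
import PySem

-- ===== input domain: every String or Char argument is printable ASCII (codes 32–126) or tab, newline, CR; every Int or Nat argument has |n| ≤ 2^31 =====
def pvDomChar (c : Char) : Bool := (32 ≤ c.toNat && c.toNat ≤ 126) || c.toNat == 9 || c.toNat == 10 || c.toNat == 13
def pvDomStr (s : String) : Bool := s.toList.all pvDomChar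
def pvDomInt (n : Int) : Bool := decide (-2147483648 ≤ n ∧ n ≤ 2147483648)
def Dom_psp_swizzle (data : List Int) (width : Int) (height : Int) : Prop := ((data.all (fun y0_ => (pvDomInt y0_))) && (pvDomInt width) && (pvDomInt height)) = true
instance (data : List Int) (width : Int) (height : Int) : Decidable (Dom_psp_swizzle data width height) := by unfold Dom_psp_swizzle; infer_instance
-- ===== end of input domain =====

-- B fills the destination tile-by-tile (iterating over 16x8 blocks, gathering each block cell
-- from its source pixel) instead of A's row-major pixel scan scattering via a running source
-- counter; alternative decomposition, same cost.  Equivalence is proved on Pre_, which is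
-- exactly the inputs where the Python A returns (elsewhere both Pythons raise IndexError).


-- ===== PORT A =====
-- Literal port of A: result = [0]*(width*height); nested y/x loops scatter data[source_index]
-- into result at the per-pixel block address.  Python's result[i]=… / data[i] raise IndexError
-- out of range; pySetD / pyGetD are their total forms, exact on Pre_ where every index is in range.
def psp_swizzle (data : List Int) (width : Int) (height : Int) : List Int :=
  let result := PySem.List.pyRepeat [(0 : Int)] (width * height)
  let row_blocks := PySem.Int.floordiv width 16
  let st :=
    (PySem.List.pyRange 0 height 1).foldl (fun st y =>
      (PySem.List.pyRange 0 width 1).foldl (fun st x =>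
        let block_x := PySem.Int.floordiv x 16
        let block_y := PySem.Int.floordiv y 8
        let block_index := block_x + block_y * row_blocks
        let block_address := block_index * 16 * 8
        (PySem.List.pySetD st.1
            (block_address + (x - block_x * 16) + ((y - block_y * 8) * 16))
            (PySem.List.pyGetD data st.2 0),
         st.2 + 1)) st)
      (result, (0 : Int))
  st.1

-- ===== PORT B =====
-- Literal port of B: iterate over destination blocks (block_y, block_x), compute the block's
-- base address once, then fill the 8x16 tile, skipping cells outside the image ('continue'
-- guards become 'if … then … else res').  pySetD / pyGetD total forms, exact on Pre_.
def psp_swizzle_alt (data : List Int) (width : Int) (height : Int) : List Int :=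
  let result := PySem.List.pyRepeat [(0 : Int)] (width * height)
  let row_blocks := PySem.Int.floordiv width 16
  (PySem.List.pyRange 0 (PySem.Int.floordiv (height + 7) 8) 1).foldl (fun res block_y =>
    (PySem.List.pyRange 0 (PySem.Int.floordiv (width + 15) 16) 1).foldl (fun res block_x =>
      let block_address := (block_x + block_y * row_blocks) * 128
      (PySem.List.pyRange 0 8 1).foldl (fun res ty =>
        let y := block_y * 8 + ty
        if y < height then
          (PySem.List.pyRange 0 16 1).foldl (fun res tx =>
            let x := block_x * 16 + tx
            if x < width then
              PySem.List.pySetD res (block_address + tx + ty * 16)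
                (PySem.List.pyGetD data (y * width + x) 0)
            else res) res
        else res) res) res) result

-- ===== PRECONDITION & SPEC =====
-- Largest destination index A writes (for width, height > 0), as a closed formula.
def maxAddrNat (wn hn : Nat) : Nat :=
  if wn < 16 then (wn - 1) + (min (hn - 1) 7) * 16
  else ((wn - 1) / 16 + ((hn - 1) / 8) * (wn / 16)) * 128 + ((hn - 1) % 8) * 16 + (wn - 1) % 16

-- Pre_ is exactly the set of inputs on which the Python A RETURNS: it excludes only inputs where
-- A raises IndexError — a destination block address reaching width*height (dimensions that do not
-- fit the 16x8 block grid), or data shorter than width*height; B raises there as well.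
def Pre_psp_swizzle (data : List Int) (width : Int) (height : Int) : Prop :=
  width ≤ 0 ∨ height ≤ 0 ∨
    (width * height ≤ (data.length : Int) ∧
      ((maxAddrNat width.toNat height.toNat : Nat) : Int) < width * height)
instance (data : List Int) (width : Int) (height : Int) : Decidable (Pre_psp_swizzle data width height) := by unfold Pre_psp_swizzle; infer_instance

def pvWitness_psp_swizzle : List Int × Int × Int := ([], 0, 0)

def Spec_psp_swizzle (data : List Int) (width : Int) (height : Int) (out : List Int) : Prop := out = psp_swizzle_alt data width height
instance (data : List Int) (width : Int) (height : Int) (out : List Int) : Decidable (Spec_psp_swizzle data width height out) := by unfold Spec_psp_swizzle; infer_instance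

-- ===== CLAIM (what is proved, stated in full; the proofs are below) =====
def Claim_equal_psp_swizzle : Prop := ∀ (data : List Int) (width : Int) (height : Int), Dom_psp_swizzle data width height → Pre_psp_swizzle data width height → Spec_psp_swizzle data width height (psp_swizzle data width height)

-- ===== LEMMAS AND PROOFS =====
def gIdx (W y x : Nat) : Nat := (x / 16 + y / 8 * W) * 128 + x % 16 + y % 8 * 16

-- generic fold lemmas -------------------------------------------------------
theorem foldl_if_filter {α : Type} (p : α → Bool) (f : List Int → α → List Int) :
    ∀ (l : List α) (r : List Int),
      l.foldl (fun r i => if p i then f r i else r) r = (l.filter p).foldl f r := by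
  intro l
  induction l with
  | nil => intro r; rfl
  | cons a t ih =>
    intro r
    by_cases h : p a = true
    · simp [h, ih]
    · simp [h, ih]

theorem foldl_congr_mem' {α : Type} (f g : List Int → α → List Int) :
    ∀ (l : List α) (r : List Int), (∀ r' b, b ∈ l → f r' b = g r' b) →
      l.foldl f r = l.foldl g r := by
  intro l
  induction l with
  | nil => intro r _; rfl
  | cons a t ih =>
    intro r h
    simp only [List.foldl_cons]
    rw [h r a (by simp)]
    exact ih _ (fun r' b hb => h r' b (by simp [hb]))

theorem foldl_preserve_len {α : Type} (f : List Int → α → List Int)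
    (hf : ∀ r b, (f r b).length = r.length) :
    ∀ (l : List α) (r : List Int), (l.foldl f r).length = r.length := by
  intro l
  induction l with
  | nil => intro r; rfl
  | cons a t ih => intro r; rw [List.foldl_cons, ih, hf]

theorem foldl_eq_of_len {α : Type} (N : Nat) (f g : List Int → α → List Int)
    (hf : ∀ r b, (f r b).length = r.length) :
    ∀ (l : List α) (r : List Int), r.length = N →
      (∀ r' b, b ∈ l → r'.length = N → f r' b = g r' b) →
      l.foldl f r = l.foldl g r := by
  intro l
  induction l with
  | nil => intro r _ _; rfl
  | cons a t ih =>
    intro r hr h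
    simp only [List.foldl_cons]
    rw [← h r a (by simp) hr]
    exact ih (f r a) (by rw [hf, hr]) (fun r' b hb hr' => h r' b (by simp [hb]) hr')

theorem scatter_length {α : Type} (f : α → Nat) (v : α → Int) :
    ∀ (l : List α) (res : List Int),
      (l.foldl (fun r i => r.set (f i) (v i)) res).length = res.length := by
  intro l
  induction l with
  | nil => intro res; rfl
  | cons a t ih => intro res; simpa using ih (res.set (f a) (v a))

theorem scatter_getElem? {α : Type} (f : α → Nat) (v : α → Int) :
    ∀ (l : List α) (res : List Int) (d : Nat), (∀ i ∈ l, f i < res.length) →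
      (l.foldl (fun r i => r.set (f i) (v i)) res)[d]? =
        match l.reverse.find? (fun i => f i == d) with
        | some i => some (v i)
        | none => res[d]? := by
  intro l
  induction l with
  | nil => intro res d _; rfl
  | cons a t ih =>
    intro res d h
    have ha : f a < res.length := h a (by simp)
    have hrec := ih (res.set (f a) (v a)) d
      (by intro i hi; simpa using h i (by simp [hi]))
    simp only [List.foldl_cons, List.reverse_cons, List.find?_append] at *
    rw [hrec]
    cases hf : t.reverse.find? (fun i => f i == d) with
    | some i => simp
    | none =>
      simp only [Option.none_or]
      by_cases hd : f a = d
      · simp [hd, hd ▸ ha]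
      · simp [hd]

theorem find?_unique {α : Type} (p : α → Bool) (a : α) :
    ∀ (l : List α), a ∈ l → p a = true → (∀ b ∈ l, p b = true → b = a) →
      l.find? p = some a := by
  intro l
  induction l with
  | nil => simp
  | cons c t ih =>
    intro hmem hp huni
    by_cases hc : p c = true
    · have : c = a := huni c (by simp) hc
      subst this
      simp [hp]
    · have hat : a ∈ t := by
        rcases List.mem_cons.1 hmem with h | h
        · exact absurd (h ▸ hp) hc
        · exact h
      rw [List.find?_cons_of_neg (by simpa using hc)]
      exact ih hat hp (fun b hb hpb => huni b (by simp [hb]) hpb)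

-- block-row decomposition of List.range ------------------------------------
theorem range_flatMap_blocks (k n : Nat) :
    (List.range k).flatMap (fun b => List.range' (8 * b) (min (n - 8 * b) 8)) =
      List.range (min n (8 * k)) := by
  induction k with
  | zero => simp
  | succ k ih =>
    rw [List.range_succ, List.flatMap_append, ih]
    simp only [List.flatMap_cons, List.flatMap_nil, List.append_nil]
    by_cases h : n ≤ 8 * k
    · have h1 : min n (8 * k) = n := by omega
      have h2 : min n (8 * (k + 1)) = n := by omega
      have h3 : min (n - 8 * k) 8 = 0 := by omega
      rw [h1, h2, h3]
      simp
    · have h1 : min n (8 * k) = 8 * k := by omega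
      have h2 : min n (8 * (k + 1)) = 8 * k + min (n - 8 * k) 8 := by omega
      rw [h1, h2, List.range_add, List.range'_eq_map_range]

-- normalization of port A to nested Nat folds -------------------------------
def stepA (data : List Int) (rb : Int) (st : List Int × Int) (y x : Int) : List Int × Int :=
  (PySem.List.pySetD st.1
      ((PySem.Int.floordiv x 16 + PySem.Int.floordiv y 8 * rb) * 16 * 8 +
        (x - PySem.Int.floordiv x 16 * 16) + ((y - PySem.Int.floordiv y 8 * 8) * 16))
      (PySem.List.pyGetD data st.2 0),
   st.2 + 1)

theorem A_as_fold (data : List Int) (width height : Int) :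
    psp_swizzle data width height =
      ((PySem.List.pyRange 0 height 1).foldl (fun st y =>
        (PySem.List.pyRange 0 width 1).foldl (fun st x =>
          stepA data (PySem.Int.floordiv width 16) st y x) st)
        (PySem.List.pyRepeat [(0:Int)] (width*height), (0:Int))).1 := rfl

theorem stepA_cast (data : List Int) (W y x : Nat) (res : List Int) (c : Nat) :
    stepA data ((W:Nat):Int) (res, ((c:Nat):Int)) (y:Nat) (x:Nat) =
      (res.set (gIdx W y x) (data.getD c 0), (((c+1:Nat)):Int)) := by
  unfold stepA
  have hidx : ((PySem.Int.floordiv (x:Int) 16 + PySem.Int.floordiv (y:Int) 8 * (W:Int)) * 16 * 8 +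
        ((x:Int) - PySem.Int.floordiv (x:Int) 16 * 16) + (((y:Int) - PySem.Int.floordiv (y:Int) 8 * 8) * 16))
      = ((gIdx W y x : Nat) : Int) := by
    rw [show ((16:Int)) = ((16:Nat):Int) by norm_num, show ((8:Int)) = ((8:Nat):Int) by norm_num]
    rw [PySem.Int.floordiv_natCast, PySem.Int.floordiv_natCast]
    unfold gIdx
    push_cast
    omega
  rw [hidx]
  simp [PySem.List.pySetD_natCast, PySem.List.pyGetD_natCast]

theorem innerA (data : List Int) (W : Nat) (y : Nat) :
    ∀ (m : Nat) (res : List Int) (c : Nat),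
      (List.range m).foldl (fun st x => stepA data ((W:Nat):Int) st (y:Nat) (x:Nat)) (res, ((c:Nat):Int)) =
        ((List.range m).foldl (fun r x => r.set (gIdx W y x) (data.getD (c+x) 0)) res, (((c+m:Nat)):Int)) := by
  intro m
  induction m with
  | zero => intro res c; simp
  | succ m ih =>
    intro res c
    rw [List.range_succ, List.foldl_append, List.foldl_append, ih]
    simp only [List.foldl_cons, List.foldl_nil]
    rw [stepA_cast]
    have : c + m + 1 = c + (m+1) := by omega
    rw [this]

theorem outerA (data : List Int) (W : Nat) (wn : Nat) :
    ∀ (hn : Nat) (res : List Int),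
      (List.range hn).foldl (fun st y => (List.range wn).foldl
          (fun st x => stepA data ((W:Nat):Int) st (y:Nat) (x:Nat)) st) (res, (0:Int)) =
        ((List.range hn).foldl (fun r y => (List.range wn).foldl
          (fun r x => r.set (gIdx W y x) (data.getD (y*wn+x) 0)) r) res, (((hn*wn:Nat)):Int)) := by
  intro hn
  induction hn with
  | zero => intro res; simp
  | succ hn ih =>
    intro res
    rw [List.range_succ, List.foldl_append, List.foldl_append, ih]
    simp only [List.foldl_cons, List.foldl_nil]
    rw [innerA]
    have : hn * wn + wn = (hn+1) * wn := by ring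
    rw [this]

theorem A_norm (data : List Int) (wn hn : Nat) :
    psp_swizzle data ((wn:Nat):Int) ((hn:Nat):Int) =
      (List.range hn).foldl (fun r y => (List.range wn).foldl
        (fun r x => r.set (gIdx (wn/16) y x) (data.getD (y*wn+x) 0)) r)
        (List.replicate (wn*hn) 0) := by
  rw [A_as_fold]
  rw [PySem.List.pyRange_one, PySem.List.pyRange_one]
  rw [show ((16:Int)) = ((16:Nat):Int) by norm_num, PySem.Int.floordiv_natCast]
  have hrep : PySem.List.pyRepeat [(0:Int)] ((wn:Int)*(hn:Int)) = List.replicate (wn*hn) 0 := by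
    rw [PySem.List.pyRepeat_singleton,
      show ((wn:Int)*(hn:Int)) = ((wn*hn:Nat):Int) by push_cast; ring, Int.toNat_natCast]
  rw [hrep]
  simp only [Int.sub_zero, Int.toNat_natCast, List.foldl_map, zero_add]
  rw [outerA]

-- normalization of port B to nested Nat folds -------------------------------
theorem B_as_fold (data : List Int) (width height : Int) :
    psp_swizzle_alt data width height =
      (PySem.List.pyRange 0 (PySem.Int.floordiv (height + 7) 8) 1).foldl (fun res block_y =>
        (PySem.List.pyRange 0 (PySem.Int.floordiv (width + 15) 16) 1).foldl (fun res block_x =>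
          (PySem.List.pyRange 0 8 1).foldl (fun res ty =>
            if block_y * 8 + ty < height then
              (PySem.List.pyRange 0 16 1).foldl (fun res tx =>
                if block_x * 16 + tx < width then
                  PySem.List.pySetD res ((block_x + block_y * PySem.Int.floordiv width 16) * 128 + tx + ty * 16)
                    (PySem.List.pyGetD data ((block_y * 8 + ty) * width + (block_x * 16 + tx)) 0)
                else res) res
            else res) res) res)
        (PySem.List.pyRepeat [(0:Int)] (width * height)) := rfl

theorem B_norm (data : List Int) (wn hn : Nat) :
    psp_swizzle_alt data ((wn:Nat):Int) ((hn:Nat):Int) =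
      (List.range ((hn + 7)/8)).foldl (fun res b =>
        (List.range ((wn + 15)/16)).foldl (fun res bx =>
          (List.range 8).foldl (fun res ty =>
            if 8 * b + ty < hn then
              (List.range 16).foldl (fun res tx =>
                if 16 * bx + tx < wn then
                  res.set ((bx + b * (wn/16)) * 128 + tx + ty * 16)
                    (data.getD ((8*b+ty) * wn + (16*bx+tx)) 0)
                else res) res
            else res) res) res)
        (List.replicate (wn*hn) 0) := by
  rw [B_as_fold]
  have hfdh : PySem.Int.floordiv ((hn:Int) + 7) 8 = (((hn + 7)/8 : Nat) : Int) := by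
    rw [show ((hn:Int) + 7) = (((hn + 7 : Nat)):Int) by push_cast; ring,
      show ((8:Int)) = ((8:Nat):Int) by norm_num]
    exact PySem.Int.floordiv_natCast _ _
  have hfdw : PySem.Int.floordiv ((wn:Int)) 16 = (((wn)/16 : Nat) : Int) := by
    rw [show ((16:Int)) = ((16:Nat):Int) by norm_num]
    exact PySem.Int.floordiv_natCast _ _
  have hfdw15 : PySem.Int.floordiv ((wn:Int) + 15) 16 = (((wn + 15)/16 : Nat) : Int) := by
    rw [show ((wn:Int) + 15) = (((wn + 15 : Nat)):Int) by push_cast; ring,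
      show ((16:Int)) = ((16:Nat):Int) by norm_num]
    exact PySem.Int.floordiv_natCast _ _
  have hrep : PySem.List.pyRepeat [(0:Int)] ((wn:Int)*(hn:Int)) = List.replicate (wn*hn) 0 := by
    rw [PySem.List.pyRepeat_singleton,
      show ((wn:Int)*(hn:Int)) = ((wn*hn:Nat):Int) by push_cast; ring, Int.toNat_natCast]
  rw [hfdh, hfdw, hfdw15, hrep]
  simp only [PySem.List.pyRange_one, Int.sub_zero, Int.toNat_natCast, List.foldl_map, zero_add,
    show (((8:Int))).toNat = 8 from rfl, show (((16:Int))).toNat = 16 from rfl]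
  apply foldl_congr_mem'
  intro r b _
  apply foldl_congr_mem'
  intro r bx _
  apply foldl_congr_mem'
  intro r ty _
  by_cases h : 8 * b + ty < hn
  · rw [if_pos (by omega), if_pos h]
    apply foldl_congr_mem'
    intro r tx _
    by_cases h2 : 16 * bx + tx < wn
    · rw [if_pos (by omega), if_pos h2]
      rw [show ((bx:Int) + (b:Int) * (((wn/16 : Nat)):Int)) * 128 + (tx:Int) + (ty:Int) * 16
            = (((bx + b * (wn/16)) * 128 + tx + ty * 16 : Nat) : Int) by push_cast; ring]
      rw [show ((b:Int) * 8 + (ty:Int)) * (wn:Int) + ((bx:Int) * 16 + (tx:Int))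
            = (((8*b+ty) * wn + (16*bx+tx) : Nat) : Int) by push_cast; ring]
      rw [PySem.List.pySetD_natCast, PySem.List.pyGetD_natCast]
    · rw [if_neg (by omega), if_neg h2]
  · rw [if_neg (by omega), if_neg h]

-- the two per-block-row cell enumerations -----------------------------------
def cellLA (wn hn b : Nat) : List (Nat × Nat) :=
  (List.range' (8*b) (min (hn - 8*b) 8)).flatMap (fun y => (List.range wn).map (fun x => (y, x)))

def cellLB (wn hn b : Nat) : List (Nat × Nat) :=
  (List.range ((wn+15)/16)).flatMap (fun bx =>
    ((List.range 8).filter (fun ty => decide (8*b+ty < hn))).flatMap (fun ty =>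
      ((List.range 16).filter (fun tx => decide (16*bx+tx < wn))).map (fun tx => (8*b+ty, 16*bx+tx))))

theorem mem_cellLA (wn hn b : Nat) (c : Nat × Nat) :
    c ∈ cellLA wn hn b ↔ 8*b ≤ c.1 ∧ c.1 < hn ∧ c.1 < 8*b+8 ∧ c.2 < wn := by
  obtain ⟨y, x⟩ := c
  unfold cellLA
  simp only [List.mem_flatMap, List.mem_map, List.mem_range, List.mem_range'_1, Prod.mk.injEq]
  constructor
  · rintro ⟨y', ⟨h1, h2⟩, x', hx', rfl, rfl⟩
    omega
  · rintro ⟨h1, h2, h3, h4⟩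
    exact ⟨y, by omega, x, h4, rfl, rfl⟩

theorem mem_cellLB (wn hn b : Nat) (c : Nat × Nat) :
    c ∈ cellLB wn hn b ↔ 8*b ≤ c.1 ∧ c.1 < hn ∧ c.1 < 8*b+8 ∧ c.2 < wn := by
  obtain ⟨y, x⟩ := c
  unfold cellLB
  simp only [List.mem_flatMap, List.mem_map, List.mem_filter, List.mem_range, decide_eq_true_eq,
    Prod.mk.injEq]
  constructor
  · rintro ⟨bx, hbx, ty, ⟨hty, hty2⟩, tx, ⟨htx, htx2⟩, rfl, rfl⟩
    omega
  · rintro ⟨h1, h2, h3, h4⟩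
    refine ⟨x/16, by omega, y - 8*b, ⟨by omega, by omega⟩, x % 16, ⟨by omega, by omega⟩, by omega, by omega⟩

theorem gIdx_inj_row (rb b : Nat) (c c' : Nat × Nat)
    (h1 : 8*b ≤ c.1) (h2 : c.1 < 8*b+8) (h1' : 8*b ≤ c'.1) (h2' : c'.1 < 8*b+8)
    (heq : gIdx rb c.1 c.2 = gIdx rb c'.1 c'.2) : c = c' := by
  obtain ⟨y, x⟩ := c
  obtain ⟨y', x'⟩ := c'
  simp only at *
  have hd : y / 8 = b := by omega
  have hd' : y' / 8 = b := by omega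
  unfold gIdx at heq
  rw [hd, hd'] at heq
  have hK : ∀ K : Nat, (x/16 + K)*128 + x%16 + y%8*16 = (x'/16 + K)*128 + x'%16 + y'%8*16 → y = y' ∧ x = x' := by
    intro K hh
    omega
  have := hK (b*rb) heq
  simp only [Prod.mk.injEq]
  omega

theorem gIdx_le_max (wn hn y x : Nat) (hy : y < hn) (hx : x < wn) :
    gIdx (wn/16) y x ≤ maxAddrNat wn hn := by
  unfold gIdx maxAddrNat
  by_cases hw : wn < 16
  · have h0 : wn/16 = 0 := by omega
    rw [h0, if_pos hw]
    omega
  · rw [if_neg hw]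
    have hrb1 : 1 ≤ wn/16 := by omega
    have hx16 : x/16*128 + x%16 ≤ (wn-1)/16*128 + (wn-1)%16 := by omega
    have hkey : y/8*((wn/16)*128) + y%8*16 ≤ (hn-1)/8*((wn/16)*128) + (hn-1)%8*16 := by
      rcases Nat.lt_or_ge (y/8) ((hn-1)/8) with hlt | hge
      · have hmul : (y/8+1)*((wn/16)*128) ≤ (hn-1)/8*((wn/16)*128) := Nat.mul_le_mul_right _ hlt
        have hexp : (y/8+1)*((wn/16)*128) = y/8*((wn/16)*128) + (wn/16)*128 := by ring
        have h128 : 128 ≤ (wn/16)*128 := by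
          calc (128:Nat) = 1*128 := by ring
          _ ≤ (wn/16)*128 := Nat.mul_le_mul_right _ hrb1
        omega
      · have heq : y/8 = (hn-1)/8 := by omega
        have hmod : y%8 ≤ (hn-1)%8 := by omega
        rw [heq]
        omega
    have e1 : (x/16 + y/8*(wn/16))*128 + x%16 + y%8*16
        = (x/16*128 + x%16) + (y/8*((wn/16)*128) + y%8*16) := by ring
    have e2 : ((wn-1)/16 + (hn-1)/8*(wn/16))*128 + (hn-1)%8*16 + (wn-1)%16
        = ((wn-1)/16*128 + (wn-1)%16) + ((hn-1)/8*((wn/16)*128) + (hn-1)%8*16) := by ring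
    rw [e1, e2]
    exact Nat.add_le_add hx16 hkey

-- the two sides agree on each block row -------------------------------------
theorem rowfold_eq_LA (data : List Int) (wn hn b : Nat) (r : List Int) :
    (List.range' (8*b) (min (hn - 8*b) 8)).foldl (fun r y => (List.range wn).foldl
        (fun r x => r.set (gIdx (wn/16) y x) (data.getD (y*wn+x) 0)) r) r =
      (cellLA wn hn b).foldl (fun r c => r.set (gIdx (wn/16) c.1 c.2) (data.getD (c.1*wn+c.2) 0)) r := by
  unfold cellLA
  rw [List.foldl_flatMap]
  simp [List.foldl_map]

theorem blockfold_eq_LB (data : List Int) (wn hn b : Nat) (r : List Int) :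
    (List.range ((wn + 15)/16)).foldl (fun res bx =>
        (List.range 8).foldl (fun res ty =>
          if 8 * b + ty < hn then
            (List.range 16).foldl (fun res tx =>
              if 16 * bx + tx < wn then
                res.set ((bx + b * (wn/16)) * 128 + tx + ty * 16)
                  (data.getD ((8*b+ty) * wn + (16*bx+tx)) 0)
              else res) res
          else res) res) r =
      (cellLB wn hn b).foldl (fun r c => r.set (gIdx (wn/16) c.1 c.2) (data.getD (c.1*wn+c.2) 0)) r := by
  unfold cellLB
  rw [List.foldl_flatMap]
  apply foldl_congr_mem'
  intro r1 bx hbx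
  have hty : ∀ (r2 : List Int) (ty : Nat),
      (if 8 * b + ty < hn then
          (List.range 16).foldl (fun res tx =>
            if 16 * bx + tx < wn then
              res.set ((bx + b * (wn/16)) * 128 + tx + ty * 16)
                (data.getD ((8*b+ty) * wn + (16*bx+tx)) 0)
            else res) r2
        else r2)
      = if decide (8*b+ty < hn) = true then
          (List.range 16).foldl (fun res tx =>
            if decide (16*bx+tx < wn) = true then
              res.set ((bx + b * (wn/16)) * 128 + tx + ty * 16)
                (data.getD ((8*b+ty) * wn + (16*bx+tx)) 0)
            else res) r2
        else r2 := by
    intro r2 ty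
    simp only [decide_eq_true_eq]
  simp only [hty]
  rw [foldl_if_filter (fun ty => decide (8*b+ty < hn))
      (fun r2 ty => (List.range 16).foldl (fun res tx =>
        if decide (16*bx+tx < wn) = true then
          res.set ((bx + b * (wn/16)) * 128 + tx + ty * 16)
            (data.getD ((8*b+ty) * wn + (16*bx+tx)) 0)
        else res) r2),
    List.foldl_flatMap]
  apply foldl_congr_mem'
  intro r2 ty hmem
  have hty8 : ty < 8 := by
    have := List.mem_filter.1 hmem
    simpa using this.1
  rw [foldl_if_filter (fun tx => decide (16*bx+tx < wn)), List.foldl_map]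
  apply foldl_congr_mem'
  intro r3 tx hmem2
  have htx : tx < 16 ∧ 16*bx+tx < wn := by
    have := List.mem_filter.1 hmem2
    constructor
    · simpa using this.1
    · simpa using this.2
  have haddr : gIdx (wn/16) (8*b+ty) (16*bx+tx) = (bx + b * (wn/16)) * 128 + tx + ty * 16 := by
    unfold gIdx
    have e1 : (16*bx+tx)/16 = bx := by omega
    have e2 : (16*bx+tx)%16 = tx := by omega
    have e3 : (8*b+ty)/8 = b := by omega
    have e4 : (8*b+ty)%8 = ty := by omega
    rw [e1, e2, e3, e4]
  rw [haddr]

theorem rowblock_eq (data : List Int) (wn hn b : Nat)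
    (hmax : maxAddrNat wn hn < wn*hn) (r : List Int) (hr : r.length = wn*hn) :
    (cellLA wn hn b).foldl (fun r c => r.set (gIdx (wn/16) c.1 c.2) (data.getD (c.1*wn+c.2) 0)) r =
      (cellLB wn hn b).foldl (fun r c => r.set (gIdx (wn/16) c.1 c.2) (data.getD (c.1*wn+c.2) 0)) r := by
  have hbound : ∀ (c : Nat × Nat), 8*b ≤ c.1 → c.1 < hn → c.2 < wn → gIdx (wn/16) c.1 c.2 < r.length := by
    intro c _ h2 h4
    have := gIdx_le_max wn hn c.1 c.2 h2 h4
    omega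
  have hA := scatter_getElem? (fun c : Nat × Nat => gIdx (wn/16) c.1 c.2)
    (fun c : Nat × Nat => data.getD (c.1*wn+c.2) 0) (cellLA wn hn b) r
  have hB := scatter_getElem? (fun c : Nat × Nat => gIdx (wn/16) c.1 c.2)
    (fun c : Nat × Nat => data.getD (c.1*wn+c.2) 0) (cellLB wn hn b) r
  apply List.ext_getElem?
  intro d
  rw [hA d (by intro c hc; obtain ⟨m1, m2, m3, m4⟩ := (mem_cellLA wn hn b c).1 hc; exact hbound c m1 m2 m4),
    hB d (by intro c hc; obtain ⟨m1, m2, m3, m4⟩ := (mem_cellLB wn hn b c).1 hc; exact hbound c m1 m2 m4)]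
  cases hfa : (cellLA wn hn b).reverse.find? (fun c => gIdx (wn/16) c.1 c.2 == d) with
  | none =>
    have hnoA : ∀ c ∈ cellLA wn hn b, ¬ (gIdx (wn/16) c.1 c.2 = d) := by
      intro c hc
      have := List.find?_eq_none.1 hfa c (List.mem_reverse.2 hc)
      simpa using this
    have hfb : (cellLB wn hn b).reverse.find? (fun c => gIdx (wn/16) c.1 c.2 == d) = none := by
      apply List.find?_eq_none.2
      intro c hc
      have hcb := List.mem_reverse.1 hc
      have hcl : c ∈ cellLA wn hn b := (mem_cellLA wn hn b c).2 ((mem_cellLB wn hn b c).1 hcb)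
      simpa using hnoA c hcl
    rw [hfb]
  | some c =>
    have hcmem : c ∈ cellLA wn hn b := List.mem_reverse.1 (List.mem_of_find?_eq_some hfa)
    have hcp := List.find?_some (p := fun c : Nat × Nat => gIdx (wn/16) c.1 c.2 == d) hfa
    have hfb : (cellLB wn hn b).reverse.find? (fun c => gIdx (wn/16) c.1 c.2 == d) = some c := by
      apply find?_unique
      · exact List.mem_reverse.2 ((mem_cellLB wn hn b c).2 ((mem_cellLA wn hn b c).1 hcmem))
      · exact hcp
      · intro c' hc' hp'
        obtain ⟨m1, m2, m3, m4⟩ := (mem_cellLB wn hn b c').1 (List.mem_reverse.1 hc')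
        obtain ⟨n1, n2, n3, n4⟩ := (mem_cellLA wn hn b c).1 hcmem
        exact gIdx_inj_row (wn/16) b c' c m1 m3 n1 n3
          (by have h1 := beq_iff_eq.1 hp'; have h2 := beq_iff_eq.1 hcp; omega)
    rw [hfb]

-- assembling the positive case ----------------------------------------------
theorem pos_case (data : List Int) (wn hn : Nat)
    (hmax : maxAddrNat wn hn < wn*hn) :
    psp_swizzle data ((wn:Nat):Int) ((hn:Nat):Int) = psp_swizzle_alt data ((wn:Nat):Int) ((hn:Nat):Int) := by
  rw [A_norm, B_norm]
  have hrange : List.range hn =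
      (List.range ((hn+7)/8)).flatMap (fun b => List.range' (8*b) (min (hn - 8*b) 8)) := by
    rw [range_flatMap_blocks]
    congr 1
    omega
  rw [hrange, List.foldl_flatMap]
  apply foldl_eq_of_len (wn*hn)
  · intro r b
    apply foldl_preserve_len
    intro r' y
    exact scatter_length (fun x => gIdx (wn/16) y x) (fun x => data.getD (y*wn+x) 0) _ r'
  · simp
  · intro r' b hb hlen
    rw [rowfold_eq_LA, blockfold_eq_LB]
    exact rowblock_eq data wn hn b hmax r' hlen

-- degenerate dimensions: both programs return the untouched [0]*(width*height)
theorem degenerate_case (data : List Int) (width height : Int) (h : width ≤ 0 ∨ height ≤ 0) :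
    psp_swizzle data width height = psp_swizzle_alt data width height := by
  rw [A_as_fold, B_as_fold]
  by_cases hh : height ≤ 0
  · rw [PySem.List.pyRange_one_eq_nil hh]
    have hB : PySem.Int.floordiv (height + 7) 8 ≤ 0 := by
      rw [PySem.Int.floordiv_eq_ediv_of_pos (by norm_num : (0:Int) < 8)]
      omega
    rw [PySem.List.pyRange_one_eq_nil hB]
    simp only [List.foldl_nil]
  · have hw : width ≤ 0 := by tauto
    rw [PySem.List.pyRange_one_eq_nil hw]
    have hBx : PySem.Int.floordiv (width + 15) 16 ≤ 0 := by
      rw [PySem.Int.floordiv_eq_ediv_of_pos (by norm_num : (0:Int) < 16)]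
      omega
    rw [PySem.List.pyRange_one_eq_nil hBx]
    simp only [List.foldl_nil]
    rw [PySem.List.foldl_ignore, PySem.List.foldl_ignore]

theorem psp_swizzle_spec : Claim_equal_psp_swizzle := by
  unfold Claim_equal_psp_swizzle Spec_psp_swizzle
  intro data width height _ hpre
  rcases hpre with hw | hh | ⟨hlen, hmax⟩
  · exact degenerate_case data width height (Or.inl hw)
  · exact degenerate_case data width height (Or.inr hh)
  · by_cases hwpos : 0 < width
    · by_cases hhpos : 0 < height
      · obtain ⟨wn, rfl⟩ : ∃ wn : Nat, width = ((wn:Nat):Int) :=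
          ⟨width.toNat, (Int.toNat_of_nonneg hwpos.le).symm⟩
        obtain ⟨hn, rfl⟩ : ∃ hn : Nat, height = ((hn:Nat):Int) :=
          ⟨height.toNat, (Int.toNat_of_nonneg hhpos.le).symm⟩
        apply pos_case data wn hn
        have : ((wn:Int)) * ((hn:Int)) = ((wn*hn : Nat) : Int) := by push_cast; ring
        rw [this, Int.toNat_natCast, Int.toNat_natCast] at hmax
        exact_mod_cast hmax
      · exact degenerate_case data width height (Or.inr (by omega))
    · exact degenerate_case data width height (Or.inl (by omega))
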